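-- pv_equiv track=rewrite | github.com/nawedy/AI-Guardian-Enhanced | ai-guardian-production-complete/backend/blockchain-security-service/src/defi/defi_security_analyzer.py | _get_rug_pull_mitigations
-- ===== SOURCE A (Python) =====
-- from typing import Dict, List, Any, Optional, Tuple
--
-- def _get_rug_pull_mitigations(risk_indicators: List[Dict]) -> List[str]:
--     """Get mitigation recommendations for rug pull risks"""
--     mitigations = []
--
--     indicator_types = [indicator["indicator"] for indicator in risk_indicators]
--
--     if "high_concentration" in indicator_types:
--         mitigations.append("Diversify token holdings across more addresses")
--
--     if "transfer_restrictions" in indicator_types: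
--         mitigations.append("Remove or reduce transfer restrictions")
--
--     if "blacklist_mechanism" in indicator_types:
--         mitigations.append("Implement transparent blacklist criteria")
--
--     if "sell_restriction" in indicator_types:
--         mitigations.append("Allow all holders to sell tokens freely")
--
--     if "low_liquidity" in indicator_types:
--         mitigations.append("Increase liquidity pool depth")
--
--     return mitigations
-- ===== SOURCE B (Python) =====
-- def _get_rug_pull_mitigations(risk_indicators):
--     """One pass over the indicators accumulating a 5-bit mask, then decode the mask."""
--     BIT = {
--         "high_concentration": 1,
--         "transfer_restrictions": 2,
--         "blacklist_mechanism": 4,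
--         "sell_restriction": 8,
--         "low_liquidity": 16,
--     }
--     MSG = [
--         "Diversify token holdings across more addresses",
--         "Remove or reduce transfer restrictions",
--         "Implement transparent blacklist criteria",
--         "Allow all holders to sell tokens freely",
--         "Increase liquidity pool depth",
--     ]
--     mask = 0
--     for indicator in risk_indicators:
--         mask |= BIT.get(indicator["indicator"], 0)
--     return [MSG[i] for i in range(5) if (mask >> i) & 1]
-- ===== Notes on version B (the rewrite author's own statement) =====
-- stated objective: alternative
-- what changed: A builds the list of indicator types and performs five separate membership scans; B makes a single pass over the indicators OR-accumulating a 5-bit presence mask and then decodes the mask into the mitigation list.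
import Mathlib
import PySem

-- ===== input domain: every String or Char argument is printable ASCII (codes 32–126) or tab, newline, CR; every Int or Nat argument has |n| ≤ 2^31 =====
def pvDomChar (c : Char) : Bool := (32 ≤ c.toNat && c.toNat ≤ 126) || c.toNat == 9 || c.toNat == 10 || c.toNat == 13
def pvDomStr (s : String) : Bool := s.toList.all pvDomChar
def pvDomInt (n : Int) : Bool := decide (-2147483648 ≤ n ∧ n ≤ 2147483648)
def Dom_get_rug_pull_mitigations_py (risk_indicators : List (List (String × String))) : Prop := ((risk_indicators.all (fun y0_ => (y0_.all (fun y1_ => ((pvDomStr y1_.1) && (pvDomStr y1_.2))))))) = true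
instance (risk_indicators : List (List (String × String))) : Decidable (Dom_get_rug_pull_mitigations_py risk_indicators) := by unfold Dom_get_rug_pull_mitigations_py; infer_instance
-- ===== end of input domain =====

-- B replaces A's type-list + five membership scans by a single pass accumulating a 5-bit presence mask, decoded at the end (objective: alternative).

-- ===== PORT A =====
def get_rug_pull_mitigations_py (risk_indicators : List (List (String × String))) : List String :=
  -- indicator_types = [indicator["indicator"] for indicator in risk_indicators]
  -- (getD "" is exact under Pre_: every dict carries the key)
  let indicator_types := risk_indicators.map (fun ind => PySem.Dict.getD (PySem.Dict.mk ind) "indicator" "")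
  let mitigations : List String := []
  let mitigations := if indicator_types.contains "high_concentration" then
      mitigations ++ ["Diversify token holdings across more addresses"] else mitigations
  let mitigations := if indicator_types.contains "transfer_restrictions" then
      mitigations ++ ["Remove or reduce transfer restrictions"] else mitigations
  let mitigations := if indicator_types.contains "blacklist_mechanism" then
      mitigations ++ ["Implement transparent blacklist criteria"] else mitigations
  let mitigations := if indicator_types.contains "sell_restriction" then
      mitigations ++ ["Allow all holders to sell tokens freely"] else mitigations
  let mitigations := if indicator_types.contains "low_liquidity" then
      mitigations ++ ["Increase liquidity pool depth"] else mitigations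
  mitigations

-- ===== PORT B =====
-- BIT.get(t, 0) of Source B (all values are nonnegative small ints, so Nat is exact)
def pvBIT : PySem.Dict String Nat :=
  PySem.Dict.mk
    [("high_concentration", 1), ("transfer_restrictions", 2), ("blacklist_mechanism", 4),
     ("sell_restriction", 8), ("low_liquidity", 16)]

-- MSG of Source B
def pvMSG : List String :=
  ["Diversify token holdings across more addresses",
   "Remove or reduce transfer restrictions",
   "Implement transparent blacklist criteria",
   "Allow all holders to sell tokens freely",
   "Increase liquidity pool depth"]

def pvBitOf (t : String) : Nat := PySem.Dict.getD pvBIT t 0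

def get_rug_pull_mitigations_py_alt (risk_indicators : List (List (String × String))) : List String :=
  -- mask = 0; for indicator in risk_indicators: mask |= BIT.get(indicator["indicator"], 0)
  let mask := risk_indicators.foldl
    (fun m ind => m ||| pvBitOf (PySem.Dict.getD (PySem.Dict.mk ind) "indicator" "")) 0
  -- [MSG[i] for i in range(5) if (mask >> i) & 1]  (i always in range of MSG, so getD "" is exact)
  ((List.range 5).filter (fun i => (mask >>> i) &&& 1 == 1)).map (fun i => pvMSG.getD i "")

-- ===== PRECONDITION & SPEC =====
-- Pre_ excludes inputs on which A raises KeyError: a dict without the key "indicator" (B raises there too).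
def Pre_get_rug_pull_mitigations_py (risk_indicators : List (List (String × String))) : Prop :=
  (risk_indicators.all (fun ind => PySem.Dict.contains (PySem.Dict.mk ind) "indicator")) = true
instance (risk_indicators : List (List (String × String))) : Decidable (Pre_get_rug_pull_mitigations_py risk_indicators) := by unfold Pre_get_rug_pull_mitigations_py; infer_instance

def pvWitness_get_rug_pull_mitigations_py : (List (List (String × String))) :=
  [[("indicator", "low_liquidity")], [("indicator", "high_concentration")]]

def Spec_get_rug_pull_mitigations_py (risk_indicators : List (List (String × String))) (out : List String) : Prop := out = get_rug_pull_mitigations_py_alt risk_indicators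
instance (risk_indicators : List (List (String × String))) (out : List String) : Decidable (Spec_get_rug_pull_mitigations_py risk_indicators out) := by unfold Spec_get_rug_pull_mitigations_py; infer_instance

-- ===== CLAIM =====
def Claim_equal_get_rug_pull_mitigations_py : Prop := ∀ (risk_indicators : List (List (String × String))), Dom_get_rug_pull_mitigations_py risk_indicators → Pre_get_rug_pull_mitigations_py risk_indicators → Spec_get_rug_pull_mitigations_py risk_indicators (get_rug_pull_mitigations_py risk_indicators)

-- ===== LEMMAS AND PROOFS =====
theorem testBit_fold (f : List (String × String) → Nat) (l : List (List (String × String))) (acc : Nat) (i : Nat) :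
    ((l.foldl (fun m ind => m ||| f ind) acc).testBit i)
      = (acc.testBit i || l.any (fun ind => (f ind).testBit i)) := by
  induction l generalizing acc with
  | nil => simp
  | cons x xs ih => simp [List.foldl, ih, Nat.testBit_or, Bool.or_assoc]

theorem pvCond (m i : Nat) : ((m >>> i) &&& 1 == 1) = m.testBit i := by
  simp only [Nat.testBit, Nat.and_one_is_mod, Nat.one_and_eq_mod_two]
  rcases Nat.mod_two_eq_zero_or_one (m >>> i) with h | h <;> simp [h]

theorem pvBitOf_eq (t : String) : pvBitOf t =
    (if t = "high_concentration" then 1 else if t = "transfer_restrictions" then 2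
     else if t = "blacklist_mechanism" then 4 else if t = "sell_restriction" then 8
     else if t = "low_liquidity" then 16 else 0) := by
  unfold pvBitOf pvBIT
  by_cases h1 : t = "high_concentration"
  · subst h1; decide
  by_cases h2 : t = "transfer_restrictions"
  · subst h2; decide
  by_cases h3 : t = "blacklist_mechanism"
  · subst h3; decide
  by_cases h4 : t = "sell_restriction"
  · subst h4; decide
  by_cases h5 : t = "low_liquidity"
  · subst h5; decide
  rw [if_neg h1, if_neg h2, if_neg h3, if_neg h4, if_neg h5]
  apply PySem.Dict.getD_of_not_contains
  simp [PySem.Dict.contains_mk, beq_eq_false_iff_ne.mpr (Ne.symm h1),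
    beq_eq_false_iff_ne.mpr (Ne.symm h2), beq_eq_false_iff_ne.mpr (Ne.symm h3),
    beq_eq_false_iff_ne.mpr (Ne.symm h4), beq_eq_false_iff_ne.mpr (Ne.symm h5)]

theorem pvBit0 (t : String) : (pvBitOf t).testBit 0 = (t == "high_concentration") := by
  rw [pvBitOf_eq]; split_ifs with h1 h2 h3 h4 h5 <;>
    first
      | (rw [h1]; decide) | (rw [h2]; decide) | (rw [h3]; decide) | (rw [h4]; decide)
      | (rw [h5]; decide) | (rw [beq_eq_false_iff_ne.mpr h1]; decide)

theorem pvBit1 (t : String) : (pvBitOf t).testBit 1 = (t == "transfer_restrictions") := by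
  rw [pvBitOf_eq]; split_ifs with h1 h2 h3 h4 h5 <;>
    first
      | (rw [h1]; decide) | (rw [h2]; decide) | (rw [h3]; decide) | (rw [h4]; decide)
      | (rw [h5]; decide) | (rw [beq_eq_false_iff_ne.mpr h2]; decide)

theorem pvBit2 (t : String) : (pvBitOf t).testBit 2 = (t == "blacklist_mechanism") := by
  rw [pvBitOf_eq]; split_ifs with h1 h2 h3 h4 h5 <;>
    first
      | (rw [h1]; decide) | (rw [h2]; decide) | (rw [h3]; decide) | (rw [h4]; decide)
      | (rw [h5]; decide) | (rw [beq_eq_false_iff_ne.mpr h3]; decide)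

theorem pvBit3 (t : String) : (pvBitOf t).testBit 3 = (t == "sell_restriction") := by
  rw [pvBitOf_eq]; split_ifs with h1 h2 h3 h4 h5 <;>
    first
      | (rw [h1]; decide) | (rw [h2]; decide) | (rw [h3]; decide) | (rw [h4]; decide)
      | (rw [h5]; decide) | (rw [beq_eq_false_iff_ne.mpr h4]; decide)

theorem pvBit4 (t : String) : (pvBitOf t).testBit 4 = (t == "low_liquidity") := by
  rw [pvBitOf_eq]; split_ifs with h1 h2 h3 h4 h5 <;>
    first
      | (rw [h1]; decide) | (rw [h2]; decide) | (rw [h3]; decide) | (rw [h4]; decide)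
      | (rw [h5]; decide) | (rw [beq_eq_false_iff_ne.mpr h5]; decide)

theorem contains_map (l : List (List (String × String))) (f : List (String × String) → String)
    (k : String) : (l.map f).contains k = l.any (fun x => f x == k) := by
  induction l with
  | nil => simp
  | cons a as ih =>
    rw [Bool.eq_iff_iff]
    simp
    constructor <;> rintro (h | ⟨x, hx, he⟩)
    · exact Or.inl h.symm
    · exact Or.inr ⟨x, hx, he⟩
    · exact Or.inl h.symm
    · exact Or.inr ⟨x, hx, he⟩

-- ===== VERDICT =====
theorem get_rug_pull_mitigations_py_spec : Claim_equal_get_rug_pull_mitigations_py := by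
  intro l _ _
  unfold Spec_get_rug_pull_mitigations_py get_rug_pull_mitigations_py get_rug_pull_mitigations_py_alt
  have hr : List.range 5 = [0, 1, 2, 3, 4] := rfl
  rw [hr]
  simp only [List.filter_cons, List.filter_nil, pvCond, testBit_fold, Nat.zero_testBit,
    Bool.false_or, pvBit0, pvBit1, pvBit2, pvBit3, pvBit4, contains_map]
  by_cases h1 : l.any (fun x => PySem.Dict.getD (PySem.Dict.mk x) "indicator" "" == "high_concentration") <;>
  by_cases h2 : l.any (fun x => PySem.Dict.getD (PySem.Dict.mk x) "indicator" "" == "transfer_restrictions") <;>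
  by_cases h3 : l.any (fun x => PySem.Dict.getD (PySem.Dict.mk x) "indicator" "" == "blacklist_mechanism") <;>
  by_cases h4 : l.any (fun x => PySem.Dict.getD (PySem.Dict.mk x) "indicator" "" == "sell_restriction") <;>
  by_cases h5 : l.any (fun x => PySem.Dict.getD (PySem.Dict.mk x) "indicator" "" == "low_liquidity") <;>
  simp [h1, h2, h3, h4, h5, pvMSG, List.getD]
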